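-- pv_equiv track=rewrite | github.com/pierpaolosestito-dev/passidoro_web_app_backend | django_server/passidoro_server/passidoro_app/views.py | checkmatchesintoname
-- ===== SOURCE A (Python) =====
-- from math import floor, ceil
--
-- def checkmatchesintoname(a,password):
--     number = len(a)
--     const_string = a
--     meta_number = floor(len(const_string)/2)
--     if(meta_number<=3):
--         meta_number = ceil(len(const_string)/2)
--
--     while(number>=meta_number):
--         number -= 1
--         if(a.lower() in password.lower() or a.upper() in password.upper()):
--             return 1
--         a = a.rstrip(a[-1])
--     return -1
-- ===== SOURCE B (Python) =====
-- def checkmatchesintoname(a, password):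
--     # One pass: follow the rstrip chain to the shortest string that would ever
--     # be tested, then do a single case-insensitive containment check (each
--     # rstrip step yields a prefix of the previous string, so the shortest
--     # tested string matches iff any tested string matches).
--     n = len(a)
--     m = n // 2
--     if m <= 3:
--         m = n - n // 2  # ceil(n/2)
--     s = a
--     for _ in range(n - m):
--         if not s:
--             break
--         s = s.rstrip(s[-1])
--     if s.lower() in password.lower() or s.upper() in password.upper():
--         return 1
--     return -1
-- ===== Notes on version B (the rewrite author's own statement) =====
-- stated objective: faster
-- what changed: A re-runs the case-insensitive containment test (re-lowering and re-uppering both whole strings) on every iteration of the rstrip loop; B follows the rstrip chain once to the shortest string that would ever be tested (each rstrip yields a prefix, so that string matches iff any tested string matches) and performs a single containment check.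
import Mathlib
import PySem

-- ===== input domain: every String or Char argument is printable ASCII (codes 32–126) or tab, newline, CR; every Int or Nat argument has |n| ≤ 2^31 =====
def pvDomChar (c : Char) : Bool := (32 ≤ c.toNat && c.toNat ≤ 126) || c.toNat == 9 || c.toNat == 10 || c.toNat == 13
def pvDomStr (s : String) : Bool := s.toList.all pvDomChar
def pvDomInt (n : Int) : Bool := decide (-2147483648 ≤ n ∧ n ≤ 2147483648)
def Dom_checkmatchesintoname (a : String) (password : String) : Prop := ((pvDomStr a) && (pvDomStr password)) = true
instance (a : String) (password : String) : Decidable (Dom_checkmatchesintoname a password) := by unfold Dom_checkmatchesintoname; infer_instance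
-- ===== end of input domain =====

-- B replaces A's per-iteration containment test (which re-lowers/uppers both strings
-- every round) by following the rstrip chain once to the shortest tested string and
-- doing a single containment check there; objective: faster.

-- shared helper: Python's s.rstrip(c) for a single character c (both A and B call
-- .rstrip with the one-character string s[-1]); exact: drops the maximal run of c
-- from the right end.
def pvRstrip1 (s : String) (c : Char) : String :=
  String.ofList ((s.toList.reverse.dropWhile (· == c)).reverse)

-- shared helper: the test 'x.lower() in password.lower() or x.upper() in password.upper()'
-- (the identical Python expression appears in both A and B)
def pvCheck (x password : String) : Bool :=
  PySem.Str.isIn (PySem.Str.lower x) (PySem.Str.lower password) ||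
  PySem.Str.isIn (PySem.Str.upper x) (PySem.Str.upper password)

-- ===== PORT A =====
-- the while loop: state (number, a); number -= 1 each round, exit when number < mt
def pvLoopA (mt : Int) (password : String) (number : Int) (a : String) : Int :=
  if number ≥ mt then
    let number' := number - 1
    if pvCheck a password then 1
    else
      -- a = a.rstrip(a[-1]); a[-1] raises only on a = "", which the check above
      -- already returned on ('' is in every string), so the none branch is dead
      pvLoopA mt password number'
        (match PySem.Str.pyGet? a (-1) with
         | some c => pvRstrip1 a c
         | none => a)
  else -1
termination_by (number - mt + 1).toNat
decreasing_by omega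

def checkmatchesintoname (a : String) (password : String) : Int :=
  let number : Int := (PySem.Str.len a : Int)
  let const_string := a
  let mt_number : Int := PySem.Int.floordiv (PySem.Str.len const_string : Int) 2  -- floor(len/2)
  let mt_number : Int :=
    if mt_number ≤ 3 then -(PySem.Int.floordiv (-(PySem.Str.len const_string : Int)) 2)  -- ceil(len/2)
    else mt_number
  pvLoopA mt_number password number a

-- ===== PORT B =====
-- B's for-loop: apply s = s.rstrip(s[-1]) k times, breaking when the string is empty
-- (the none branch of s[-1] is unreachable: s ≠ "" there)
def pvChainB (s : String) : Nat → String
  | 0 => s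
  | k + 1 =>
    if s = "" then s
    else
      match PySem.Str.pyGet? s (-1) with
      | some c => pvChainB (pvRstrip1 s c) k
      | none => s

def checkmatchesintoname_alt (a : String) (password : String) : Int :=
  let n : Int := (PySem.Str.len a : Int)
  let m : Int := PySem.Int.floordiv n 2
  let m : Int := if m ≤ 3 then n - PySem.Int.floordiv n 2 else m  -- ceil(n/2)
  let s := pvChainB a (n - m).toNat
  if pvCheck s password then 1 else -1

-- ===== PRECONDITION & SPEC =====
def Spec_checkmatchesintoname (a : String) (password : String) (out : Int) : Prop := out = checkmatchesintoname_alt a password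
instance (a : String) (password : String) (out : Int) : Decidable (Spec_checkmatchesintoname a password out) := by unfold Spec_checkmatchesintoname; infer_instance

-- ===== CLAIM (what is proved, stated in full; the proofs are below) =====
def Claim_equal_checkmatchesintoname : Prop := ∀ (a : String) (password : String), Dom_checkmatchesintoname a password → Spec_checkmatchesintoname a password (checkmatchesintoname a password)

-- ===== LEMMAS AND PROOFS =====

-- the empty string matches everything
lemma pvCheck_empty (password : String) : pvCheck "" password = true := by
  simp [pvCheck, PySem.Str.toList_lower, PySem.Chars.lower]

-- s[-1] exists on a nonempty string
lemma pvGet_neg_one_isSome (a : String) (h : a ≠ "") : (PySem.Str.pyGet? a (-1)).isSome := by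
  have hne : a.toList ≠ [] := by
    intro hh; exact h (String.toList_eq_nil_iff.mp hh)
  have hl : 0 < a.toList.length := List.length_pos_iff.mpr hne
  have hl' : 1 ≤ a.length := by simpa using hl
  simp [PySem.Str.pyGet?, PySem.Chars.pyGet?_eq_listPyGet?, PySem.List.pyGet?, PySem.List.pyIdx?, hl']
  omega

-- rstrip yields a prefix
lemma pvRstrip1_prefix (s : String) (c : Char) : (pvRstrip1 s c).toList <+: s.toList := by
  rw [pvRstrip1, String.toList_ofList]
  have h := List.dropWhile_suffix (l := s.toList.reverse) (p := (· == c))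
  simpa using List.reverse_prefix.mpr h

-- the check is monotone under prefixes of the needle
lemma pvCheck_mono {b a : String} (h : b.toList <+: a.toList) (password : String)
    (ha : pvCheck a password = true) : pvCheck b password = true := by
  simp only [pvCheck, Bool.or_eq_true, PySem.Str.isIn_iff_infix, PySem.Str.toList_lower,
    PySem.Str.toList_upper, PySem.Chars.lower, PySem.Chars.upper] at ha ⊢
  rcases ha with hl | hr
  · exact Or.inl (((h.map PySem.Chars.lowerChar).isInfix).trans hl)
  · exact Or.inr (((h.map PySem.Chars.upperChar).isInfix).trans hr)

-- the chain result is a prefix of its start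
lemma pvChainB_prefix (s : String) (k : Nat) : (pvChainB s k).toList <+: s.toList := by
  induction k generalizing s with
  | zero => exact List.prefix_refl _
  | succ k ih =>
    rw [pvChainB]
    split
    · exact List.prefix_refl _
    · cases hg : PySem.Str.pyGet? s (-1) with
      | some c =>
        exact (ih (pvRstrip1 s c)).trans (pvRstrip1_prefix s c)
      | none => exact List.prefix_refl _

-- A's loop computes B's single check on the chain end
lemma pvLoopA_eq (mt : Int) (pw : String) :
    ∀ (k : Nat) (number : Int) (a : String), mt ≤ number → (number - mt).toNat = k →
      pvLoopA mt pw number a =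
        (if pvCheck (pvChainB a k) pw then 1 else -1) := by
  intro k
  induction k with
  | zero =>
    intro number a h hk
    rw [pvLoopA, if_pos h]
    cases hc : pvCheck a pw with
    | true => simp [pvChainB, hc]
    | false =>
      simp only [hc, Bool.false_eq_true, if_false, pvChainB]
      rw [pvLoopA, if_neg (by omega)]
  | succ k ih =>
    intro number a h hk
    rw [pvLoopA, if_pos h]
    cases hc : pvCheck a pw with
    | true =>
      have h2 : pvCheck (pvChainB a (k + 1)) pw = true :=
        pvCheck_mono (pvChainB_prefix a (k + 1)) pw hc
      simp [h2]
    | false =>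
      have hne : a ≠ "" := by
        intro he; subst he; rw [pvCheck_empty] at hc; cases hc
      obtain ⟨c, hcsome⟩ := Option.isSome_iff_exists.mp (pvGet_neg_one_isSome a hne)
      have h2 : pvChainB a (k + 1) = pvChainB (pvRstrip1 a c) k := by
        rw [pvChainB, if_neg hne, hcsome]
      simp only [Bool.false_eq_true, if_false, hcsome, h2]
      exact ih (number - 1) (pvRstrip1 a c) (by omega) (by omega)

-- ===== VERDICT (by name: the statement is the Claim_ definition above) =====
theorem checkmatchesintoname_spec : Claim_equal_checkmatchesintoname := by
  intro a password _
  unfold Spec_checkmatchesintoname checkmatchesintoname checkmatchesintoname_alt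
  dsimp only
  have hn : (0 : Int) ≤ (PySem.Str.len a : Int) := Int.natCast_nonneg _
  set n : Int := (PySem.Str.len a : Int) with hndef
  have e1 : PySem.Int.floordiv n 2 = n / 2 := PySem.Int.floordiv_eq_ediv_of_pos (by norm_num)
  have e2 : PySem.Int.floordiv (-n) 2 = (-n) / 2 := PySem.Int.floordiv_eq_ediv_of_pos (by norm_num)
  have hm : (if PySem.Int.floordiv n 2 ≤ 3 then -(PySem.Int.floordiv (-n) 2) else PySem.Int.floordiv n 2)
      = (if PySem.Int.floordiv n 2 ≤ 3 then n - PySem.Int.floordiv n 2 else PySem.Int.floordiv n 2) := by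
    split
    · rw [e1, e2]; omega
    · rfl
  rw [hm]
  set m : Int := (if PySem.Int.floordiv n 2 ≤ 3 then n - PySem.Int.floordiv n 2 else PySem.Int.floordiv n 2) with hmdef
  have hle : m ≤ n := by
    rw [hmdef, e1]; split <;> omega
  exact pvLoopA_eq m password ((n - m).toNat) n a hle rfl
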